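-- pv_equiv track=rewrite | github.com/zbp-xxxp/Quantum-circuit-synthesis-by-paddlepaddle | 0531/utils.py | CostCompute
-- ===== SOURCE A (Python) =====
-- def CostCompute(s):
--     sc=0
--     for line in s.split('\n'):
--         if len(line)>0:
--             if line[0]=='R':
--                 sc+=1
--             elif line[0]=='C':
--                 sc+=8
--     return sc
-- ===== SOURCE B (Python) =====
-- def CostCompute(s):
--     sc = 0
--     at_start = True
--     for c in s:
--         if at_start:
--             if c == 'R':
--                 sc += 1
--             elif c == 'C':
--                 sc += 8
--         at_start = (c == '\n')
--     return sc
-- ===== Notes on version B (the rewrite author's own statement) =====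
-- stated objective: alternative
-- what changed: B makes a single pass over the characters with an at-start-of-line flag instead of building the list of lines with s.split(' ') and inspecting each line's first character.
import Mathlib
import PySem

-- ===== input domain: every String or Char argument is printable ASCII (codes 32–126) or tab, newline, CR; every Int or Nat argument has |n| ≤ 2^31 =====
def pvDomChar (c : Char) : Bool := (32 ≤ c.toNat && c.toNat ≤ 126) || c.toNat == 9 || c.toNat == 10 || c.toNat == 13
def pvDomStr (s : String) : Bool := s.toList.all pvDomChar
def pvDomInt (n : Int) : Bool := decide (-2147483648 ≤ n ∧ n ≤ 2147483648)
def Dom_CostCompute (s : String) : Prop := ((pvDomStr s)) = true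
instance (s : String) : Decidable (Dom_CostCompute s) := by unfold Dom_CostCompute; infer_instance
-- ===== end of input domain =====

-- B replaces s.split('\n') + first-character tests by a single character scan with an
-- at-start-of-line flag (alternative decomposition, same cost).

-- ===== PORT A =====
def CostCompute (s : String) : Int :=
  (PySem.Chars.splitOn s.toList "\n".toList).foldl
    (fun sc line =>
      if line.length > 0 then
        if PySem.List.pyGet? line 0 = some 'R' then sc + 1
        else if PySem.List.pyGet? line 0 = some 'C' then sc + 8
        else sc
      else sc) 0

-- ===== PORT B =====
def CostCompute_alt (s : String) : Int :=
  (s.toList.foldl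
    (fun st c =>
      (st.1 + (if st.2 then (if c = 'R' then 1 else if c = 'C' then 8 else 0) else 0),
       c == '\n'))
    ((0 : Int), true)).1

-- ===== PRECONDITION & SPEC =====
def Spec_CostCompute (s : String) (out : Int) : Prop := out = CostCompute_alt s
instance (s : String) (out : Int) : Decidable (Spec_CostCompute s out) := by unfold Spec_CostCompute; infer_instance

-- ===== CLAIM (what is proved, stated in full; the proofs are below) =====
def Claim_equal_CostCompute : Prop := ∀ (s : String), Dom_CostCompute s → Spec_CostCompute s (CostCompute s)

-- ===== LEMMAS AND PROOFS =====

-- value contributed by one character standing at the start of a line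
def pvVal (c : Char) : Int := if c = 'R' then 1 else if c = 'C' then 8 else 0

-- value of one line under A's test
def pvLineVal (line : List Char) : Int :=
  match line with
  | [] => 0
  | c :: _ => pvVal c

def pvLineSum (L : List (List Char)) : Int := (L.map pvLineVal).sum

-- reference splitter for a one-character separator
def pvConsHead (c : Char) (L : List (List Char)) : List (List Char) :=
  match L with
  | [] => [[c]]
  | h :: t => (c :: h) :: t

def pvSplit (cs : List Char) : List (List Char) :=
  match cs with
  | [] => [[]]
  | c :: rest => if c = '\n' then [] :: pvSplit rest else pvConsHead c (pvSplit rest)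

lemma pvSplit_ne_nil (cs : List Char) : pvSplit cs ≠ [] := by
  cases cs with
  | nil => simp [pvSplit]
  | cons c rest =>
    simp only [pvSplit]
    split
    · simp
    · cases h : pvSplit rest <;> simp [pvConsHead]

-- prepend a prefix to the first piece
def pvConsApp (pre : List Char) (L : List (List Char)) : List (List Char) :=
  match L with
  | [] => [pre]
  | h :: t => (pre ++ h) :: t

lemma splitOn_go_eq (fuel : Nat) (l cur : List Char) (acc : List (List Char))
    (h : l.length < fuel) :
    PySem.Chars.splitOn.go ['\n'] fuel l cur acc
      = acc.reverse ++ pvConsApp cur.reverse (pvSplit l) := by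
  induction fuel generalizing l cur acc with
  | zero => omega
  | succ f ih =>
    cases l with
    | nil => simp [PySem.Chars.splitOn.go, pvSplit, pvConsApp]
    | cons c rest =>
      by_cases hc : c = '\n'
      · subst hc
        have : (['\n'] : List Char).isPrefixOf ('\n' :: rest) = true := by
          simp [List.isPrefixOf]
        simp only [PySem.Chars.splitOn.go, this, if_pos, List.length_cons,
          List.drop_succ_cons, List.length_nil, List.drop_zero]
        rw [ih rest [] (cur.reverse :: acc) (by simpa using Nat.lt_of_succ_lt_succ h)]
        cases hs : pvSplit rest with
        | nil => exact absurd hs (pvSplit_ne_nil rest)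
        | cons hh tt => simp [pvSplit, pvConsApp, hs]
      · have : (['\n'] : List Char).isPrefixOf (c :: rest) = false := by
          simp [List.isPrefixOf, Ne.symm hc]
        simp only [PySem.Chars.splitOn.go, this]
        rw [if_neg (by simp)]
        rw [ih rest (c :: cur) acc (by simpa using Nat.lt_of_succ_lt_succ h)]
        cases hs : pvSplit rest with
        | nil => exact absurd hs (pvSplit_ne_nil rest)
        | cons hh tt => simp [pvSplit, pvConsApp, pvConsHead, hs, hc]

lemma splitOn_eq_pvSplit (cs : List Char) :
    PySem.Chars.splitOn cs ['\n'] = pvSplit cs := by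
  have h := splitOn_go_eq (cs.length + 1) cs [] [] (by omega)
  cases hs : pvSplit cs with
  | nil => exact absurd hs (pvSplit_ne_nil cs)
  | cons hh tt =>
    simpa [PySem.Chars.splitOn, hs, pvConsApp] using h

-- A's fold is the line sum
lemma foldA_eq (L : List (List Char)) (a : Int) :
    L.foldl
      (fun sc line =>
        if line.length > 0 then
          if PySem.List.pyGet? line 0 = some 'R' then sc + 1
          else if PySem.List.pyGet? line 0 = some 'C' then sc + 8
          else sc
        else sc) a = a + pvLineSum L := by
  induction L generalizing a with
  | nil => simp [pvLineSum]
  | cons line rest ih =>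
    have hstep :
        (if line.length > 0 then
          if PySem.List.pyGet? line 0 = some 'R' then a + 1
          else if PySem.List.pyGet? line 0 = some 'C' then a + 8
          else a
        else a) = a + pvLineVal line := by
      cases line with
      | nil => simp [pvLineVal]
      | cons c cs =>
        simp only [PySem.List.pyGet?, PySem.List.pyIdx?]
        simp [pvLineVal, pvVal]
        split_ifs <;> simp_all
    simp only [List.foldl_cons, hstep, ih]
    simp [pvLineSum]
    ring

-- B's fold computes the line sum of pvSplit (with the flag deciding whether
-- the head line's first character still counts)
lemma foldB_eq (cs : List Char) (a : Int) (flag : Bool) :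
    (cs.foldl
      (fun st c =>
        (st.1 + (if st.2 then (if c = 'R' then 1 else if c = 'C' then 8 else 0) else 0),
         c == '\n'))
      (a, flag)).1
    = a + (if flag then pvLineSum (pvSplit cs) else pvLineSum ((pvSplit cs).tail)) := by
  induction cs generalizing a flag with
  | nil => cases flag <;> simp [pvSplit, pvLineSum, pvLineVal]
  | cons c rest ih =>
    simp only [List.foldl_cons, ih]
    by_cases hc : c = '\n'
    · subst hc
      cases flag <;>
        simp [pvSplit, pvLineSum, pvLineVal, pvVal]
    · have hflag : (c == '\n') = false := by simp [hc]
      cases hs : pvSplit rest with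
      | nil => exact absurd hs (pvSplit_ne_nil rest)
      | cons hh tt =>
        cases flag <;>
          simp [pvSplit, hc, hs, pvConsHead, hflag, pvLineSum, pvLineVal, pvVal] <;>
          ring

-- ===== VERDICT (by name: the statement is the Claim_ definition above) =====
theorem CostCompute_spec : Claim_equal_CostCompute := by
  intro s _
  unfold Spec_CostCompute CostCompute CostCompute_alt
  have hsep : ("\n".toList : List Char) = ['\n'] := by decide
  rw [hsep, splitOn_eq_pvSplit, foldA_eq, foldB_eq]
  simp
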